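-- pv_equiv track=rewrite | github.com/ztrawhcs/crosspoint-enhanced-reading-mod | scripts/gen_i18n.py | _unescape_yaml_value
-- ===== SOURCE A (Python) =====
-- from typing import List, Dict, Tuple
--
-- def _unescape_yaml_value(raw: str, filepath: str = "", line_num: int = 0) -> str:
--     """
--     Process escape sequences in a YAML value string.
--
--     Recognized escapes:  \\\\  →  \\       \\"  →  "       \\n  →  newline
--     """
--     result: List[str] = []
--     i = 0
--     while i < len(raw):
--         if raw[i] == "\\" and i + 1 < len(raw):
--             nxt = raw[i + 1]
--             if nxt == "\\":
--                 result.append("\\")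
--             elif nxt == '"':
--                 result.append('"')
--             elif nxt == "n":
--                 result.append("\n")
--             else:
--                 raise ValueError(
--                     f"{filepath}:{line_num}: unknown escape '\\{nxt}'"
--                 )
--             i += 2
--         else:
--             result.append(raw[i])
--             i += 1
--     return "".join(result)
-- ===== SOURCE B (Python) =====
-- def _unescape_yaml_value(raw: str, filepath: str = "", line_num: int = 0) -> str:
--     # Split on single backslashes: each later part begins right after an escape
--     # introducer, so its first character names the escape; an empty part means
--     # the escaped character was the backslash separating it from the next part.
--     parts = raw.split('\\')
--     res = [parts[0]]
--     j = 1
--     while j < len(parts):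
--         t = parts[j]
--         if t == '':
--             if j == len(parts) - 1:
--                 res.append('\\')           # unpaired final backslash is kept as-is
--             else:
--                 res.append('\\' + parts[j + 1])
--                 j += 1
--         elif t[0] == '"':
--             res.append('"' + t[1:])
--         elif t[0] == 'n':
--             res.append('\n' + t[1:])
--         else:
--             raise ValueError(
--                 f"{filepath}:{line_num}: unknown escape '\\{t[0]}'"
--             )
--         j += 1
--     return ''.join(res)
-- ===== Notes on version B (the rewrite author's own statement) =====
-- stated objective: faster
-- what changed: B replaces A's per-character index scan with one split-on-backslash pass: each later part of the split starts with the escaped character (an empty part meaning an escaped backslash), so the escape table is applied only to part heads and the bulk copying is done by split/join.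
import Mathlib
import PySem

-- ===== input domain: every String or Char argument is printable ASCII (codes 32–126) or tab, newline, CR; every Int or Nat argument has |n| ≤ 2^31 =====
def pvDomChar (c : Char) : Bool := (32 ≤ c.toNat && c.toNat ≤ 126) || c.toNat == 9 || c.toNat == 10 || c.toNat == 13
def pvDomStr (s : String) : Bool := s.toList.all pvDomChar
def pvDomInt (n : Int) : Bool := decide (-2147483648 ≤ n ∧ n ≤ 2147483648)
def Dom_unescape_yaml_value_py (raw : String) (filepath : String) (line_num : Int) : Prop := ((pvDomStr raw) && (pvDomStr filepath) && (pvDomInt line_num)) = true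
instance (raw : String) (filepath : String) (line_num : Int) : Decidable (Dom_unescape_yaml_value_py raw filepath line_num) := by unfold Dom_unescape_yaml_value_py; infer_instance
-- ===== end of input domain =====

-- B processes the escapes by splitting on backslashes and reading each later part's
-- first character as the escape name, instead of A's index-by-index character scan
-- (objective: alternative; same return value wherever A returns).

-- ===== PORT A =====
-- A's while loop over index i, appending one-character strings to `result`;
-- `none` models the ValueError raised on an unknown escape (excluded by Pre_).
def pvALoop : List Char → Option (List (List Char))
  | [] => some []
  | c :: [] => some [[c]]
  | c :: nxt :: rest =>
    if c = '\\' then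
      if nxt = '\\' then (pvALoop rest).map (['\\'] :: ·)
      else if nxt = '"' then (pvALoop rest).map (['"'] :: ·)
      else if nxt = 'n' then (pvALoop rest).map (['\n'] :: ·)
      else none
    else (pvALoop (nxt :: rest)).map ([c] :: ·)

def unescape_yaml_value_py (raw : String) (filepath : String) (line_num : Int) : String :=
  match pvALoop raw.toList with
  | some pieces => String.ofList (PySem.Chars.join [] pieces)   -- "".join(result)
  | none => ""   -- A raises ValueError here; such inputs are excluded by Pre_

-- ===== PORT B =====
-- Source B's while loop over the parts of the backslash-split of raw (index j; the empty-part
-- case consumes the following part as well); `none` models the ValueError.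
def pvBLoop : List (List Char) → Option (List (List Char))
  | [] => some []
  | [] :: [] => some [['\\']]
  | [] :: t2 :: rest2 => (pvBLoop rest2).map (('\\' :: t2) :: ·)
  | (c :: cs) :: rest =>
    if c = '"' then (pvBLoop rest).map (('"' :: cs) :: ·)
    else if c = 'n' then (pvBLoop rest).map (('\n' :: cs) :: ·)
    else none

def unescape_yaml_value_py_alt (raw : String) (filepath : String) (line_num : Int) : String :=
  match PySem.Chars.splitOn raw.toList ['\\'] with   -- the split on the backslash separator, sep ≠ ''
  | [] => ""   -- unreachable: split never returns an empty list
  | t0 :: rest =>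
    match pvBLoop rest with
    | some pieces => String.ofList (PySem.Chars.join [] (t0 :: pieces))  -- ''.join(res)
    | none => ""   -- Source B raises ValueError here; excluded by Pre_

-- ===== PRECONDITION & SPEC =====
-- Pre_ excludes exactly the inputs on which A raises ValueError: every backslash that
-- starts an escape must be followed by '\\', '"' or 'n'.
def pvOkEsc : List Char → Bool
  | [] => true
  | [_] => true
  | c :: c2 :: rest =>
    if c = '\\' then (c2 = '\\' || c2 = '"' || c2 = 'n') && pvOkEsc rest
    else pvOkEsc (c2 :: rest)

def Pre_unescape_yaml_value_py (raw : String) (filepath : String) (line_num : Int) : Prop :=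
  pvOkEsc raw.toList = true

instance (raw : String) (filepath : String) (line_num : Int) : Decidable (Pre_unescape_yaml_value_py raw filepath line_num) := by unfold Pre_unescape_yaml_value_py; infer_instance

def pvWitness_unescape_yaml_value_py : String × String × Int := ("a\\nb\\\\c\\\"", "f.yaml", 3)

def Spec_unescape_yaml_value_py (raw : String) (filepath : String) (line_num : Int) (out : String) : Prop := out = unescape_yaml_value_py_alt raw filepath line_num
instance (raw : String) (filepath : String) (line_num : Int) (out : String) : Decidable (Spec_unescape_yaml_value_py raw filepath line_num out) := by unfold Spec_unescape_yaml_value_py; infer_instance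

-- ===== CLAIM (what is proved, stated in full; the proofs are below) =====
def Claim_equal_unescape_yaml_value_py : Prop := ∀ (raw : String) (filepath : String) (line_num : Int), Dom_unescape_yaml_value_py raw filepath line_num → Pre_unescape_yaml_value_py raw filepath line_num → Spec_unescape_yaml_value_py raw filepath line_num (unescape_yaml_value_py raw filepath line_num)

-- ===== LEMMAS AND PROOFS =====

-- Proof-side model of raw.split('\\') (single-character separator).
def pvSplit : List Char → List (List Char)
  | [] => [[]]
  | c :: rest => if c = '\\' then [] :: pvSplit rest else (pvSplit rest).modifyHead (c :: ·)

theorem pvSplit_ne_nil (l : List Char) : pvSplit l ≠ [] := by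
  induction l with
  | nil => simp [pvSplit]
  | cons c rest ih =>
    simp only [pvSplit]
    split_ifs
    · simp
    · cases h : pvSplit rest with
      | nil => exact absurd h ih
      | cons h2 t2 => simp [List.modifyHead]

-- prepend to the head of a split-list
def pvConsHd (p : List Char) : List (List Char) → List (List Char)
  | [] => [p]
  | h :: t => (p ++ h) :: t

theorem pvGo_spec (fuel : Nat) : ∀ (l cur : List Char) (acc : List (List Char)),
    l.length < fuel →
    PySem.Chars.splitOn.go ['\\'] fuel l cur acc = acc.reverse ++ pvConsHd cur.reverse (pvSplit l) := by
  induction fuel with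
  | zero => intro l cur acc h; omega
  | succ n ih =>
    intro l cur acc h
    cases l with
    | nil =>
      simp [PySem.Chars.splitOn.go, pvSplit, pvConsHd]
    | cons c rest =>
      rw [PySem.Chars.splitOn.go]
      by_cases hc : c = '\\'
      · subst hc
        have hpre : List.isPrefixOf ['\\'] ('\\' :: rest) = true := by
          simp [List.isPrefixOf]
        simp only [hpre, if_true, List.length_cons, List.length_nil, List.drop_succ_cons,
          List.drop_zero]
        rw [ih rest [] (List.reverse cur :: acc) (by simp at h ⊢; omega)]
        have hne := pvSplit_ne_nil rest
        cases hsp : pvSplit rest with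
        | nil => exact absurd hsp hne
        | cons h2 t2 => simp [pvSplit, pvConsHd, hsp]
      · have hpre : List.isPrefixOf ['\\'] (c :: rest) = false := by
          simp [List.isPrefixOf]
          intro hcc; exact hc hcc.symm
        simp only [hpre, Bool.false_eq_true, if_false]
        rw [ih rest (c :: cur) acc (by simp at h ⊢; omega)]
        have hne := pvSplit_ne_nil rest
        cases hsp : pvSplit rest with
        | nil => exact absurd hsp hne
        | cons h2 t2 => simp [pvSplit, pvConsHd, hsp, hc, List.modifyHead]

theorem pvSplitOn_eq (l : List Char) : PySem.Chars.splitOn l ['\\'] = pvSplit l := by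
  unfold PySem.Chars.splitOn
  rw [pvGo_spec (l.length + 1) l [] [] (by omega)]
  have hne := pvSplit_ne_nil l
  cases hsp : pvSplit l with
  | nil => exact absurd hsp hne
  | cons h t => simp [pvConsHd]

theorem pvJoin_nil_eq_flatten (ps : List (List Char)) : PySem.Chars.join [] ps = ps.flatten := by
  induction ps with
  | nil => simp [PySem.Chars.join, List.intercalate]
  | cons h t ih =>
    cases t with
    | nil => simp [PySem.Chars.join, List.intercalate]
    | cons h2 t2 =>
      simp only [PySem.Chars.join, List.intercalate] at ih ⊢
      simp [List.intersperse] at ih ⊢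
      simp [ih]

-- The core correspondence: on well-escaped input, A's scan succeeds, B's split-walk
-- succeeds, and the two flattened results coincide.
theorem pvCore : ∀ (n : Nat) (l : List Char), l.length ≤ n → pvOkEsc l = true →
    ∃ h t ares bres, pvSplit l = h :: t ∧ pvALoop l = some ares ∧ pvBLoop t = some bres ∧
      ares.flatten = h ++ bres.flatten := by
  intro n
  induction n with
  | zero =>
    intro l hlen _
    have : l = [] := by cases l <;> simp_all
    subst this
    exact ⟨[], [], [], [], by simp [pvSplit], by simp [pvALoop], by simp [pvBLoop], by simp⟩
  | succ n ih =>
    intro l hlen hok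
    cases l with
    | nil =>
      exact ⟨[], [], [], [], by simp [pvSplit], by simp [pvALoop], by simp [pvBLoop], by simp⟩
    | cons c rest =>
      by_cases hc : c = '\\'
      · subst hc
        cases rest with
        | nil =>
          exact ⟨[], [[]], [['\\']], [['\\']], by simp [pvSplit],
            by simp [pvALoop], by simp [pvBLoop], by simp⟩
        | cons c2 rest2 =>
          simp only [pvOkEsc] at hok
          simp at hok
          obtain ⟨hc2, hrest⟩ := hok
          obtain ⟨h2, t2, ares2, bres2, hsp2, ha2, hb2, hflat2⟩ :=
            ih rest2 (by simp at hlen ⊢; omega) hrest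
          rcases hc2 with (hc2 | hc2) | hc2 <;> subst hc2
          · -- escaped backslash
            refine ⟨[], [] :: h2 :: t2, ['\\'] :: ares2, ('\\' :: h2) :: bres2, ?_, ?_, ?_, ?_⟩
            · simp [pvSplit, hsp2]
            · simp [pvALoop, ha2]
            · simp [pvBLoop, hb2]
            · simp [hflat2]
          · -- escaped quote
            refine ⟨[], ('"' :: h2) :: t2, ['"'] :: ares2, ('"' :: h2) :: bres2, ?_, ?_, ?_, ?_⟩
            · simp [pvSplit, hsp2, List.modifyHead]
            · simp [pvALoop, ha2]
            · simp [pvBLoop, hb2]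
            · simp [hflat2]
          · -- escaped n
            refine ⟨[], ('n' :: h2) :: t2, ['\n'] :: ares2, ('\n' :: h2) :: bres2, ?_, ?_, ?_, ?_⟩
            · simp [pvSplit, hsp2, List.modifyHead]
            · simp [pvALoop, ha2]
            · simp [pvBLoop, hb2]
            · simp [hflat2]
      · cases rest with
        | nil =>
          exact ⟨[c], [], [[c]], [], by simp [pvSplit, hc, List.modifyHead],
            by simp [pvALoop], by simp [pvBLoop], by simp⟩
        | cons r rs =>
          have hok' : pvOkEsc (r :: rs) = true := by simpa [pvOkEsc, hc] using hok
          obtain ⟨h2, t2, ares2, bres2, hsp2, ha2, hb2, hflat2⟩ :=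
            ih (r :: rs) (by simp at hlen ⊢; omega) hok'
          refine ⟨c :: h2, t2, [c] :: ares2, bres2, ?_,
            by simp [pvALoop, hc, ha2], hb2, by simp [hflat2]⟩
          rw [pvSplit.eq_def]
          simp only [if_neg hc]
          rw [hsp2]
          simp [List.modifyHead]

-- ===== VERDICT (by name: the statement is the Claim_ definition above) =====
theorem unescape_yaml_value_py_spec : Claim_equal_unescape_yaml_value_py := by
  intro raw filepath line_num _ hpre
  unfold Spec_unescape_yaml_value_py unescape_yaml_value_py unescape_yaml_value_py_alt
  obtain ⟨h, t, ares, bres, hsp, ha, hb, hflat⟩ :=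
    pvCore raw.toList.length raw.toList le_rfl hpre
  rw [pvSplitOn_eq, hsp, ha]
  simp only [hb, pvJoin_nil_eq_flatten]
  simp [hflat]
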